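/-
  EVERY Spec file of the statement layer, imported TOGETHER: this module compiles iff no two groups define the same name.
  (The unit statements Vorbis/Spec/Units/*.lean import the groups they need; Vorbis/Spec/AllUnits.lean imports all of them.)
-/
import Vorbis.Spec.Basic
import Vorbis.Spec.Common
import Vorbis.Spec.DecodeInv
import Vorbis.Spec.Runtime
import Vorbis.Spec.Libc
import Vorbis.Spec.LibcMisc
import Vorbis.Spec.LibcSort
import Vorbis.Spec.LibcSortBridge
import Vorbis.Spec.Libm
import Vorbis.Spec.Leaves
import Vorbis.Spec.Leaves2
import Vorbis.Spec.Alloc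
import Vorbis.Spec.Reader
import Vorbis.Spec.ReaderLemmas
import Vorbis.Spec.Codebook
import Vorbis.Spec.Codebook.ScalarRaw
import Vorbis.Spec.Codebook.SortedHuffman
import Vorbis.Spec.Codebook.Deint
import Vorbis.Spec.StartDecoderAt
import Vorbis.Spec.StartDecoderA
import Vorbis.Spec.StartDecoderB
import Vorbis.Spec.PacketRest
import Vorbis.Spec.PacketRestFrame
import Vorbis.Spec.DecodeResidue
import Vorbis.Spec.Mdct
import Vorbis.Spec.MdctTop
import Vorbis.Spec.MdctUse
import Vorbis.Spec.Top
import Vorbis.Spec.TopIface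
import Vorbis.Spec.Final
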